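-- pv_equiv track=rewrite | github.com/OPENARMS1027/swea | babygin.py | three_same_num
-- ===== SOURCE A (Python) =====
-- def three_same_num(n,arr,point):
--     arr.sort()
--     for a in range(n):
--         cnt = 1
--         for k in range(a+1,n):
--             if arr[a] == arr[k]:
--                 cnt += 1
--             if cnt == 3:
--                 return point +1
--     return point
-- ===== SOURCE B (Python) =====
-- def three_same_num(n, arr, point):
--     arr.sort()
--     counts = {}
--     for i in range(n):
--         v = arr[i]
--         c = counts.get(v, 0) + 1
--         if c == 3:
--             return point + 1
--         counts[v] = c
--     return point
-- ===== Notes on version B (the rewrite author's own statement) =====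
-- stated objective: faster
-- what changed: A's quadratic nested index scan (for each a, rescan arr[a+1:n] counting matches) is replaced by a single pass that tallies each value in a dict and returns as soon as any tally reaches 3; the sort is kept only to preserve A's in-place mutation of arr.
-- outside the precondition, e.g. on three_same_num(5, [1, 1, 1], 0): A returns 1, B returns 1; on three_same_num(1, [], 0): A returns 0, B raises IndexError; on three_same_num(5, [1, 2, 2, 2], 0): A raises IndexError, B returns 1
import Mathlib
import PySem

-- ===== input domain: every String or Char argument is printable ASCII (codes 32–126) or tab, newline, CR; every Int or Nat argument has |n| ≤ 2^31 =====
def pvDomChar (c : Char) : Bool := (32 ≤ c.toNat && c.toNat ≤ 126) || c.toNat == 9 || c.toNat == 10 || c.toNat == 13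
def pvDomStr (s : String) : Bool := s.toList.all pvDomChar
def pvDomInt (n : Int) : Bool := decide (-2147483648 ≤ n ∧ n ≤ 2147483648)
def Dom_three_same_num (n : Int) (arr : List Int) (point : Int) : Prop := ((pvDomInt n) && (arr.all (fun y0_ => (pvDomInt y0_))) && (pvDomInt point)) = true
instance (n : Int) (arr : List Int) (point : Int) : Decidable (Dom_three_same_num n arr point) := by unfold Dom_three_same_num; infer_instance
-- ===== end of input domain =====

-- B replaces A's quadratic nested index scan by one linear counting pass over a dict (sort kept only
-- because A sorts arr in place; the equivalence proved here is about the RETURN value, both Pythons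
-- mutate arr identically by sorting it).

-- ===== PORT A =====
-- inner 'for k in range(a+1, n)' loop: counts matches of x = arr[a], early-returns point+1 at cnt == 3
def threeSameInner (s : List Int) (x : Int) (ks : List Int) (cnt : Int) (point : Int) : Option Int :=
  match ks with
  | [] => none
  | k :: rest =>
    let cnt' := if x == PySem.List.pyGetD s k 0 then cnt + 1 else cnt
    if cnt' == 3 then some (point + 1) else threeSameInner s x rest cnt' point

-- outer 'for a in range(n)' loop
def threeSameOuter (s : List Int) (n : Int) (as_ : List Int) (point : Int) : Int :=
  match as_ with
  | [] => point
  | a :: rest =>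
    match threeSameInner s (PySem.List.pyGetD s a 0) (PySem.List.pyRange (a + 1) n 1) 1 point with
    | some r => r
    | none => threeSameOuter s n rest point

def three_same_num (n : Int) (arr : List Int) (point : Int) : Int :=
  let s := PySem.List.sorted arr (fun x => x) false
  threeSameOuter s n (PySem.List.pyRange 0 n 1) point

-- ===== PORT B =====
-- 'for i in range(n)' loop with the dict of counts; early-returns point+1 when a count reaches 3
def threeSameAltLoop (s : List Int) (is_ : List Int) (counts : PySem.Dict Int Int) (point : Int) : Int :=
  match is_ with
  | [] => point
  | i :: rest =>
    let v := PySem.List.pyGetD s i 0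
    let c := counts.getD v 0 + 1
    if c == 3 then point + 1
    else threeSameAltLoop s rest (counts.insert v c) point

def three_same_num_alt (n : Int) (arr : List Int) (point : Int) : Int :=
  let s := PySem.List.sorted arr (fun x => x) false
  threeSameAltLoop s (PySem.List.pyRange 0 n 1) PySem.Dict.empty point

-- ===== PRECONDITION & SPEC =====
-- Pre_ excludes n > len(arr): there A's out-of-range index access raises IndexError on most inputs,
-- and whether A returns at all before the bad access is an accident of how many duplicates of the
-- minimum sit at the front of the sorted list.
def Pre_three_same_num (n : Int) (arr : List Int) (point : Int) : Prop :=
  n ≤ (arr.length : Int)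
instance (n : Int) (arr : List Int) (point : Int) : Decidable (Pre_three_same_num n arr point) := by unfold Pre_three_same_num; infer_instance

def pvWitness_three_same_num : Int × List Int × Int := (4, [2, 1, 2, 2], 7)

def Spec_three_same_num (n : Int) (arr : List Int) (point : Int) (out : Int) : Prop := out = three_same_num_alt n arr point
instance (n : Int) (arr : List Int) (point : Int) (out : Int) : Decidable (Spec_three_same_num n arr point out) := by unfold Spec_three_same_num; infer_instance

-- ===== CLAIM (what is proved, stated in full; the proofs are below) =====
def Claim_equal_three_same_num : Prop := ∀ (n : Int) (arr : List Int) (point : Int), Dom_three_same_num n arr point → Pre_three_same_num n arr point → Spec_three_same_num n arr point (three_same_num n arr point)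


-- ===== LEMMAS AND PROOFS =====

-- 'some value occurs ≥ 3 times', phrased the way A's outer loop discovers it (head against its tail)
def hasTriple : List Int → Bool
  | [] => false
  | v :: t => decide (2 ≤ t.count v) || hasTriple t

lemma hasTriple_iff (l : List Int) : hasTriple l = true ↔ ∃ x, 3 ≤ l.count x := by
  induction l with
  | nil => simp [hasTriple]
  | cons v t ih =>
    simp only [hasTriple, Bool.or_eq_true, decide_eq_true_eq, ih]
    constructor
    · rintro (h | ⟨x, hx⟩)
      · exact ⟨v, by simp; omega⟩
      · refine ⟨x, ?_⟩
        rw [List.count_cons]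
        split <;> omega
    · rintro ⟨x, hx⟩
      rw [List.count_cons] at hx
      rcases eq_or_ne x v with rfl | hxv
      · left; simp at hx; omega
      · right; exact ⟨x, by simp [Ne.symm hxv] at hx; omega⟩

lemma map_pyGet_seg (s : List Int) (m : Nat) (hm : m ≤ s.length) :
    ∀ (d j : Nat), j + d = m →
      (PySem.List.pyRange (j : Int) (m : Int) 1).map (fun k => PySem.List.pyGetD s k 0)
        = (s.take m).drop j := by
  intro d
  induction d with
  | zero =>
    intro j hj
    have hjm : j = m := by omega
    subst hjm
    rw [PySem.List.pyRange_one_eq_nil (le_refl _),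
        List.drop_eq_nil_of_le (by rw [List.length_take]; omega), List.map_nil]
  | succ d ih =>
    intro j hj
    have hjm : j < m := by omega
    have hjl : j < s.length := by omega
    rw [PySem.List.pyRange_one_cons (by exact_mod_cast hjm)]
    have hcast : ((j : Int) + 1) = ((j + 1 : Nat) : Int) := by push_cast; ring
    rw [List.map_cons, hcast, ih (j + 1) (by omega)]
    have h1 : PySem.List.pyGetD s (j : Int) 0 = s[j] := by
      rw [PySem.List.pyGetD_natCast, List.getD_eq_getElem s 0 hjl]
    have h2 : j < (s.take m).length := by rw [List.length_take]; omega
    rw [h1, List.drop_eq_getElem_cons h2, List.getElem_take]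

lemma inner_spec (s : List Int) (x point : Int) :
    ∀ (ks : List Int) (cnt : Int), cnt < 3 →
      threeSameInner s x ks cnt point =
        if 3 ≤ cnt + (((ks.map (fun k => PySem.List.pyGetD s k 0)).count x : Int)) then
          some (point + 1) else none := by
  intro ks
  induction ks with
  | nil =>
    intro cnt h
    simp only [threeSameInner, List.map_nil, List.count_nil]
    rw [if_neg (by omega)]
  | cons k rest ih =>
    intro cnt h
    have hnn : (0 : Int) ≤ (((rest.map (fun k => PySem.List.pyGetD s k 0)).count x : Int)) :=
      Int.natCast_nonneg _
    simp only [threeSameInner, List.map_cons, List.count_cons]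
    by_cases hx : x = PySem.List.pyGetD s k 0
    · have hb1 : (x == PySem.List.pyGetD s k 0) = true := beq_iff_eq.mpr hx
      have hb2 : (PySem.List.pyGetD s k 0 == x) = true := beq_iff_eq.mpr hx.symm
      simp only [hb1, hb2, if_true]
      by_cases hc : cnt = 2
      · subst hc
        rw [if_pos (by decide), if_pos (by push_cast; omega)]
      · rw [if_neg (by simp only [beq_iff_eq]; omega), ih (cnt + 1) (by omega)]
        by_cases h3 : 3 ≤ cnt + 1 + (((rest.map (fun k => PySem.List.pyGetD s k 0)).count x : Int))
        · rw [if_pos h3, if_pos (by push_cast; omega)]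
        · rw [if_neg h3, if_neg (by push_cast; omega)]
    · have hb1 : (x == PySem.List.pyGetD s k 0) = false := by
        simp only [beq_eq_false_iff_ne, ne_eq]; exact hx
      have hb2 : (PySem.List.pyGetD s k 0 == x) = false := by
        simp only [beq_eq_false_iff_ne, ne_eq]; exact fun he => hx he.symm
      have hc3 : (cnt == 3) = false := by simp only [beq_eq_false_iff_ne, ne_eq]; omega
      simp only [hb1, hb2, hc3, Bool.false_eq_true, if_false, Nat.add_zero]
      exact ih cnt h

lemma outer_spec (s : List Int) (point : Int) (m : Nat) (hm : m ≤ s.length) :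
    ∀ (d j : Nat), j + d = m →
      threeSameOuter s (m : Int) (PySem.List.pyRange (j : Int) (m : Int) 1) point =
        if hasTriple ((s.take m).drop j) then point + 1 else point := by
  intro d
  induction d with
  | zero =>
    intro j hj
    have hjm : j = m := by omega
    subst hjm
    rw [PySem.List.pyRange_one_eq_nil (le_refl _),
        List.drop_eq_nil_of_le (by rw [List.length_take]; omega)]
    simp [threeSameOuter, hasTriple]
  | succ d ih =>
    intro j hj
    have hjm : j < m := by omega
    have hjl : j < s.length := by omega
    rw [PySem.List.pyRange_one_cons (by exact_mod_cast hjm)]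
    have h2 : j < (s.take m).length := by rw [List.length_take]; omega
    have hseg : (s.take m).drop j = s[j] :: (s.take m).drop (j + 1) :=
      (List.drop_eq_getElem_cons h2).trans (by rw [List.getElem_take])
    have hcast : ((j : Int) + 1) = ((j + 1 : Nat) : Int) := by push_cast; ring
    have h1 : PySem.List.pyGetD s (j : Int) 0 = s[j] := by
      rw [PySem.List.pyGetD_natCast, List.getD_eq_getElem s 0 hjl]
    simp only [threeSameOuter]
    rw [inner_spec s _ point _ 1 (by omega), hcast,
        map_pyGet_seg s m hm d (j + 1) (by omega), h1, hseg]
    simp only [hasTriple]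
    by_cases hcnt : 3 ≤ (1 : Int) + ((((s.take m).drop (j + 1)).count s[j] : Int))
    · rw [if_pos hcnt]
      have hd2 : decide (2 ≤ ((s.take m).drop (j + 1)).count s[j]) = true := by
        simp only [decide_eq_true_eq]; omega
      simp [hd2]
    · rw [if_neg hcnt]
      have hd2 : decide (2 ≤ ((s.take m).drop (j + 1)).count s[j]) = false := by
        simp only [decide_eq_false_iff_not]; omega
      simp only [hd2, Bool.false_or]
      simpa using ih (j + 1) (by omega)

lemma alt_spec (s : List Int) (point : Int) (m : Nat) (hm : m ≤ s.length) :
    ∀ (d j : Nat), j + d = m → ∀ (counts : PySem.Dict Int Int),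
      (∀ x, counts.getD x 0 = ((s.take j).count x : Int)) →
      (∀ x, (s.take j).count x ≤ 2) →
      threeSameAltLoop s (PySem.List.pyRange (j : Int) (m : Int) 1) counts point =
        if hasTriple (s.take m) then point + 1 else point := by
  intro d
  induction d with
  | zero =>
    intro j hj counts hc hno
    have hjm : j = m := by omega
    subst hjm
    rw [PySem.List.pyRange_one_eq_nil (le_refl _)]
    have hfalse : hasTriple (s.take j) = false := by
      rw [Bool.eq_false_iff]
      intro ht
      obtain ⟨x, hx⟩ := (hasTriple_iff _).mp ht
      exact absurd hx (by have := hno x; omega)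
    rw [hfalse]
    simp [threeSameAltLoop]
  | succ d ih =>
    intro j hj counts hc hno
    have hjm : j < m := by omega
    have hjl : j < s.length := by omega
    rw [PySem.List.pyRange_one_cons (by exact_mod_cast hjm)]
    have h1 : PySem.List.pyGetD s (j : Int) 0 = s[j] := by
      rw [PySem.List.pyGetD_natCast, List.getD_eq_getElem s 0 hjl]
    have htake : s.take (j + 1) = s.take j ++ [s[j]] := by
      rw [List.take_add_one, List.getElem?_eq_getElem hjl]
      rfl
    have hcount : ∀ x : Int, (s.take (j + 1)).count x
        = (s.take j).count x + if s[j] = x then 1 else 0 := by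
      intro x
      rw [htake, List.count_append]
      simp [List.count_singleton, beq_iff_eq]
    have hcast : ((j : Int) + 1) = ((j + 1 : Nat) : Int) := by push_cast; ring
    simp only [threeSameAltLoop, h1, hc]
    by_cases h3 : (((s.take j).count s[j] : Int)) + 1 = 3
    · rw [if_pos (beq_iff_eq.mpr h3)]
      have hcnt3 : 3 ≤ (s.take (j + 1)).count s[j] := by
        have := hcount s[j]
        simp at this
        omega
      have hpre : (s.take (j + 1)).Sublist (s.take m) := by
        have h := List.take_sublist (j + 1) (s.take m)
        rwa [List.take_take, min_eq_left (by omega)] at h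
      have htrue : hasTriple (s.take m) = true :=
        (hasTriple_iff _).mpr ⟨s[j], le_trans hcnt3 (hpre.count_le _)⟩
      rw [htrue]
      simp
    · rw [if_neg (by simp only [beq_iff_eq]; exact h3), hcast]
      apply ih (j + 1) (by omega)
      · intro x
        rw [PySem.Dict.getD_insert, hcount]
        by_cases hxv : x = s[j]
        · rw [if_pos hxv, hxv]
          simp
        · rw [if_neg hxv, hc, if_neg (fun he => hxv he.symm)]
          simp
      · intro x
        rw [hcount]
        by_cases hxv : s[j] = x
        · have hx2 : (s.take j).count x ≤ 2 := hno x
          rw [if_pos hxv]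
          subst hxv
          omega
        · rw [if_neg hxv]
          have := hno x
          omega

-- ===== VERDICT (by name: the statement is the Claim_ definition above) =====
theorem three_same_num_spec : Claim_equal_three_same_num := by
  intro n arr point _ hP
  unfold Pre_three_same_num at hP
  unfold Spec_three_same_num three_same_num three_same_num_alt
  have hlen : (PySem.List.sorted arr (fun x => x) false).length = arr.length :=
    (PySem.List.sorted_perm arr (fun x => x) false).length_eq
  by_cases hn : n ≤ 0
  · rw [PySem.List.pyRange_one_eq_nil hn]
    rfl
  · have hnm : n = (n.toNat : Int) := (Int.toNat_of_nonneg (by omega)).symm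
    have hm : n.toNat ≤ (PySem.List.sorted arr (fun x => x) false).length := by
      rw [hlen]; omega
    rw [hnm]
    have HA := outer_spec (PySem.List.sorted arr (fun x => x) false) point n.toNat hm n.toNat 0 (by omega)
    have HB := alt_spec (PySem.List.sorted arr (fun x => x) false) point n.toNat hm n.toNat 0 (by omega)
      PySem.Dict.empty (by intro x; simp [PySem.Dict.getD_empty]) (by intro x; simp)
    simp only [Nat.cast_zero, List.drop_zero] at HA HB
    rw [HA]
    exact HB.symm
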